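-- pv_equiv track=rewrite | github.com/SYannL/PPG_BP_Prediction | src/build_march_tables_from_xlsx.py | _parse_ppg_name
-- ===== SOURCE A (Python) =====
-- from typing import Dict, List, Optional, Tuple
--
-- def _normalize_key(s: str) -> str:
--     return s.strip().lower().replace(" ", "")
--
-- def _parse_ppg_name(name: str) -> Optional[Tuple[str, str, str, str]]:
--     """
--     Excel name format: Subject_f/w_state_MM_DD_HH_MM
--     e.g. Siyan_f_sit_03_02_14_47
--     -> (siyan, f, sit, 03_02_14_47)
--     """
--     name = _normalize_key(name)
--     parts = name.split("_")
--     if len(parts) < 6: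
--         return None
--     time_parts = parts[-4:]
--     if not all(p.isdigit() for p in time_parts):
--         return None
--     time_key = "_".join(time_parts)
--     state = parts[-5].lower()
--     if state not in ("sit", "lay", "plank"):
--         return None
--     fw = parts[-6].lower()
--     if fw not in ("f", "w"):
--         return None
--     subject = "_".join(parts[:-6]).lower()
--     if not subject:
--         return None
--     return subject, fw, state, time_key
-- ===== SOURCE B (Python) =====
-- from typing import Optional, Tuple
--
-- def _parse_ppg_name(name: str) -> Optional[Tuple[str, str, str, str]]:
--     # Single right-to-left character scan: peel the last six "_"-fields off the
--     # normalized name without ever building the full split list.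
--     s = name.strip().lower().replace(" ", "")
--     fields = []          # the last up-to-6 underscore-fields, last field first
--     cur = ""
--     for ch in reversed(s):
--         if ch == "_" and len(fields) < 6:
--             fields.append(cur)
--             cur = ""
--         else:
--             cur = ch + cur
--     if len(fields) < 6 or not cur:
--         return None
--     t4, t3, t2, t1, state, fw = fields
--     if not (t1.isdigit() and t2.isdigit() and t3.isdigit() and t4.isdigit()):
--         return None
--     if state not in ("sit", "lay", "plank"):
--         return None
--     if fw not in ("f", "w"):
--         return None
--     return cur, fw, state, t1 + "_" + t2 + "_" + t3 + "_" + t4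
-- ===== Notes on version B (the rewrite author's own statement) =====
-- stated objective: alternative
-- what changed: A splits the whole normalized name into a list and validates by negative indexing/slicing from the end plus a join to rebuild the subject; B never builds the split list: it does one right-to-left character scan that peels off the last six underscore-fields, leaving the subject prefix as the scan remainder.
import Mathlib
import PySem

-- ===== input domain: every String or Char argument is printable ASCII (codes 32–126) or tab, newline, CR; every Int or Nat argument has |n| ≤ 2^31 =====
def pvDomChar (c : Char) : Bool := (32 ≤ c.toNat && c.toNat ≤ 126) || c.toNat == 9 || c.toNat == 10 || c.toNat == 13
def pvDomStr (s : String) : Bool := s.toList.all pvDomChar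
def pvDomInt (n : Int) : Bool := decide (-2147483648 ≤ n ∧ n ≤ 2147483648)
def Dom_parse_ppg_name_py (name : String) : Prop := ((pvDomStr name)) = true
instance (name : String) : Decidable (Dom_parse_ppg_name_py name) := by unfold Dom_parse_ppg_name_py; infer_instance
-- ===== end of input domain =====

-- B replaces A's split-into-a-list + index-from-the-end validation by a single
-- right-to-left character scan that peels the last six "_"-fields (objective: alternative).

-- ===== PORT A =====
def parse_ppg_name_py (name : String) : Option (String × String × String × String) :=
  -- name = _normalize_key(name) = name.strip().lower().replace(" ", "")
  let s := (PySem.Str.replace (PySem.Str.lower (PySem.Str.strip name)) " " "").toList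
  -- parts = name.split("_")
  let parts := PySem.Chars.splitOn s ['_']
  if parts.length < 6 then none
  else
    -- time_parts = parts[-4:]
    let time_parts := PySem.List.slice parts (some (-4)) none
    if ¬ (time_parts.all (fun p => PySem.Chars.strIsdigit p) = true) then none
    else
      let time_key := PySem.Chars.join ['_'] time_parts
      -- parts[-5] / parts[-6]: in range since parts.length ≥ 6, so the .getD [] default is never used
      let state := PySem.Chars.lower ((PySem.List.pyGet? parts (-5)).getD [])
      if ¬ (state = "sit".toList ∨ state = "lay".toList ∨ state = "plank".toList) then none
      else
        let fw := PySem.Chars.lower ((PySem.List.pyGet? parts (-6)).getD [])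
        if ¬ (fw = "f".toList ∨ fw = "w".toList) then none
        else
          -- subject = "_".join(parts[:-6]).lower()
          let subject := PySem.Chars.lower (PySem.Chars.join ['_'] (PySem.List.slice parts none (some (-6))))
          if subject = [] then none
          else some (String.ofList subject, String.ofList fw, String.ofList state, String.ofList time_key)

-- ===== PORT B =====
-- loop body of B's scan: on "_" close the current field (at most six), else prepend the char
def pvStep (st : List (List Char) × List Char) (ch : Char) : List (List Char) × List Char :=
  if ch = '_' ∧ st.1.length < 6 then (st.1 ++ [st.2], []) else (st.1, ch :: st.2)

def parse_ppg_name_py_alt (name : String) : Option (String × String × String × String) :=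
  let s := (PySem.Str.replace (PySem.Str.lower (PySem.Str.strip name)) " " "").toList
  -- for ch in reversed(s): …
  let scan := s.reverse.foldl pvStep ([], [])
  if scan.1.length < 6 ∨ scan.2 = [] then none
  else
    match scan.1 with
    | [t4, t3, t2, t1, state, fw] =>
      if ¬ (PySem.Chars.strIsdigit t1 = true ∧ PySem.Chars.strIsdigit t2 = true ∧
            PySem.Chars.strIsdigit t3 = true ∧ PySem.Chars.strIsdigit t4 = true) then none
      else if ¬ (state = "sit".toList ∨ state = "lay".toList ∨ state = "plank".toList) then none
      else if ¬ (fw = "f".toList ∨ fw = "w".toList) then none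
      else some (String.ofList scan.2, String.ofList fw, String.ofList state,
                 String.ofList (t1 ++ '_' :: t2 ++ '_' :: t3 ++ '_' :: t4))
    | _ => none  -- unreachable: the scan collects at most six fields, and at least six were checked

-- ===== PRECONDITION & SPEC =====
def Spec_parse_ppg_name_py (name : String) (out : Option (String × String × String × String)) : Prop := out = parse_ppg_name_py_alt name
instance (name : String) (out : Option (String × String × String × String)) : Decidable (Spec_parse_ppg_name_py name out) := by unfold Spec_parse_ppg_name_py; infer_instance

-- ===== CLAIM (what is proved, stated in full; the proofs are below) =====
def Claim_equal_parse_ppg_name_py : Prop := ∀ (name : String), Dom_parse_ppg_name_py name → Spec_parse_ppg_name_py name (parse_ppg_name_py name)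

-- ===== LEMMAS AND PROOFS =====

theorem pv_replace_go_space (l : List Char) : ∀ (acc : List Char) (fuel : Nat), l.length ≤ fuel →
    PySem.Chars.replace.go [' '] [] fuel l acc = acc.reverse ++ l.filter (fun c => c != ' ') := by
  induction l with
  | nil => intro acc fuel h; cases fuel <;> simp [PySem.Chars.replace.go]
  | cons c t ih =>
    intro acc fuel h
    cases fuel with
    | zero => simp at h
    | succ f =>
      have hf : t.length ≤ f := by simpa using h
      by_cases hc : c = ' '
      · rw [PySem.Chars.replace.go]
        rw [if_pos (by simp [hc, List.isPrefixOf])]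
        simp only [List.length_cons, List.length_nil, Nat.zero_add, List.drop_succ_cons,
          List.drop_zero, List.reverse_nil, List.nil_append]
        rw [ih acc f hf]
        simp [hc]
      · rw [PySem.Chars.replace.go]
        rw [if_neg (by simp [List.isPrefixOf]; intro hcc; exact hc hcc.symm)]
        rw [ih (c :: acc) f hf]
        simp [hc]

theorem pv_replace_space (l : List Char) :
    PySem.Chars.replace l [' '] [] = l.filter (fun c => c != ' ') := by
  unfold PySem.Chars.replace
  rw [if_neg (by simp)]
  simpa using pv_replace_go_space l [] l.length le_rfl

-- structural single-char split: (head field, remaining fields)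
def pvSplitP : List Char → List Char × List (List Char)
  | [] => ([], [])
  | c :: rest =>
      let p := pvSplitP rest
      if c = '_' then ([], p.1 :: p.2) else (c :: p.1, p.2)

theorem pv_splitOn_go (l : List Char) : ∀ (cur : List Char) (acc : List (List Char)) (fuel : Nat), l.length ≤ fuel →
    PySem.Chars.splitOn.go ['_'] fuel l cur acc
      = acc.reverse ++ (cur.reverse ++ (pvSplitP l).1) :: (pvSplitP l).2 := by
  induction l with
  | nil => intro cur acc fuel h; cases fuel <;> simp [PySem.Chars.splitOn.go, pvSplitP]
  | cons c t ih =>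
    intro cur acc fuel h
    cases fuel with
    | zero => simp at h
    | succ f =>
      have hf : t.length ≤ f := by simpa using h
      by_cases hc : c = '_'
      · rw [PySem.Chars.splitOn.go]
        rw [if_pos (by simp [hc, List.isPrefixOf])]
        simp only [List.length_cons, List.length_nil, Nat.zero_add, List.drop_succ_cons,
          List.drop_zero]
        rw [ih [] (cur.reverse :: acc) f hf]
        simp [pvSplitP, hc]
      · rw [PySem.Chars.splitOn.go]
        rw [if_neg (by simp [List.isPrefixOf]; intro hcc; exact hc hcc.symm)]
        rw [ih (c :: cur) acc f hf]
        simp [pvSplitP, hc]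

theorem pv_splitOn_eq (s : List Char) :
    PySem.Chars.splitOn s ['_'] = (pvSplitP s).1 :: (pvSplitP s).2 := by
  unfold PySem.Chars.splitOn
  rw [pv_splitOn_go s [] [] (s.length + 1) (by omega)]
  simp

theorem pv_splitP_chars (s : List Char) (P : Char → Prop) (h : ∀ c ∈ s, P c) :
    (∀ c ∈ (pvSplitP s).1, P c) ∧ (∀ p ∈ (pvSplitP s).2, ∀ c ∈ p, P c) := by
  induction s with
  | nil => simp [pvSplitP]
  | cons c t ih =>
    have h' : ∀ x ∈ t, P x := fun x hx => h x (List.mem_cons_of_mem _ hx)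
    obtain ⟨ih1, ih2⟩ := ih h'
    by_cases hc : c = '_'
    · simp only [pvSplitP, hc]
      constructor
      · simp
      · intro p hp
        rcases List.mem_cons.mp hp with rfl | hp
        · exact ih1
        · exact ih2 p hp
    · simp only [pvSplitP, if_neg hc]
      refine ⟨?_, ih2⟩
      intro x hx
      rcases List.mem_cons.mp hx with rfl | hx
      · exact h x (List.mem_cons_self)
      · exact ih1 x hx

theorem pv_ofNat_lower (c : Char) (h1 : 65 ≤ c.toNat) (h2 : c.toNat ≤ 90) : (Char.ofNat (c.toNat + 32)).toNat = c.toNat + 32 := by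
  have hv : Nat.isValidChar (c.val.toNat + 32) := Or.inl (by have : c.toNat ≤ 90 := h2; simp only [Char.toNat] at this; omega)
  simp only [Char.ofNat, Char.toNat] at *
  rw [dif_pos hv]
  simp [Char.ofNatAux]
  simp only [Char.toNat]
  omega

theorem pv_le_toNat (c d : Char) : (c ≤ d) ↔ c.toNat ≤ d.toNat := ⟨fun h => by exact h, fun h => by exact h⟩

theorem pv_lowerChar_of_not (c : Char) (h : ¬ ('A' ≤ c ∧ c ≤ 'Z')) : PySem.Chars.lowerChar c = c := by
  unfold PySem.Chars.lowerChar PySem.Chars.isupper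
  rw [if_neg]
  rw [Bool.and_eq_true, decide_eq_true_eq, decide_eq_true_eq]
  exact h

theorem pv_lowerChar_fix (c : Char) :
    PySem.Chars.lowerChar (PySem.Chars.lowerChar c) = PySem.Chars.lowerChar c := by
  by_cases h : ('A' ≤ c ∧ c ≤ 'Z')
  · have h1 : 65 ≤ c.toNat := (pv_le_toNat _ _).mp h.1
    have h2 : c.toNat ≤ 90 := (pv_le_toNat _ _).mp h.2
    have hd : PySem.Chars.lowerChar c = Char.ofNat (c.toNat + 32) := by
      unfold PySem.Chars.lowerChar PySem.Chars.isupper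
      rw [if_pos]
      rw [Bool.and_eq_true, decide_eq_true_eq, decide_eq_true_eq]
      exact h
    rw [hd]
    apply pv_lowerChar_of_not
    intro hc
    have h4 : (Char.ofNat (c.toNat + 32)).toNat ≤ ('Z').toNat := (pv_le_toNat _ _).mp hc.2
    rw [pv_ofNat_lower c h1 h2] at h4
    have : ('Z').toNat = 90 := rfl
    omega
  · rw [pv_lowerChar_of_not c h, pv_lowerChar_of_not c h]

theorem pv_norm_fix (name : String) :
    ∀ c ∈ (PySem.Str.replace (PySem.Str.lower (PySem.Str.strip name)) " " "").toList,
      PySem.Chars.lowerChar c = c := by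
  intro c hc
  rw [PySem.Str.toList_replace, PySem.Str.toList_lower] at hc
  rw [show (" " : String).toList = [' '] from rfl, show ("" : String).toList = ([] : List Char) from rfl] at hc
  rw [pv_replace_space] at hc
  have hc2 := List.mem_of_mem_filter hc
  rw [PySem.Chars.lower] at hc2
  obtain ⟨a, _, rfl⟩ := List.mem_map.mp hc2
  exact pv_lowerChar_fix a

theorem pv_lower_fixed (xs : List Char) (h : ∀ c ∈ xs, PySem.Chars.lowerChar c = c) :
    PySem.Chars.lower xs = xs := by
  unfold PySem.Chars.lower
  exact (List.map_congr_left h).trans (List.map_id xs)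

theorem pv_mem_join (l : List (List Char)) (c : Char) (hc : c ∈ PySem.Chars.join ['_'] l) :
    c = '_' ∨ ∃ p ∈ l, c ∈ p := by
  induction l with
  | nil => simp [PySem.Chars.join_nil] at hc
  | cons p rest ih =>
    cases rest with
    | nil =>
      rw [PySem.Chars.join_singleton] at hc
      exact Or.inr ⟨p, by simp, hc⟩
    | cons q r2 =>
      rw [PySem.Chars.join_cons_cons] at hc
      simp only [List.mem_append, List.mem_singleton] at hc
      rcases hc with (hp | hu) | hrest
      · exact Or.inr ⟨p, by simp, hp⟩
      · exact Or.inl hu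
      · rcases ih hrest with h1 | ⟨r, hr, hcr⟩
        · exact Or.inl h1
        · exact Or.inr ⟨r, List.mem_cons_of_mem _ hr, hcr⟩

theorem pv_lower_join (l : List (List Char)) (h : ∀ p ∈ l, ∀ c ∈ p, PySem.Chars.lowerChar c = c) :
    PySem.Chars.lower (PySem.Chars.join ['_'] l) = PySem.Chars.join ['_'] l := by
  apply pv_lower_fixed
  intro c hc
  rcases pv_mem_join l c hc with rfl | ⟨p, hp, hcp⟩
  · exact pv_lowerChar_of_not _ (by decide)
  · exact h p hp c hcp

theorem pv_decomp6 {α : Type} (t : List α) (h : 6 ≤ t.length) :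
    ∃ rs a b c d e f, t = rs ++ [a, b, c, d, e, f] := by
  have hd : (t.drop (t.length - 6)).length = 6 := by
    simp
    omega
  have hex : ∃ a b c d e f, t.drop (t.length - 6) = [a, b, c, d, e, f] := by
    rcases hl : t.drop (t.length - 6) with _ | ⟨a, _ | ⟨b, _ | ⟨c, _ | ⟨d, _ | ⟨e, _ | ⟨f, _ | ⟨g, l⟩⟩⟩⟩⟩⟩⟩ <;>
        rw [hl] at hd <;> simp at hd
    exact ⟨a, b, c, d, e, f, rfl⟩
  obtain ⟨a, b, c, d, e, f, hl⟩ := hex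
  exact ⟨t.take (t.length - 6), a, b, c, d, e, f, by rw [← hl, List.take_append_drop]⟩

theorem pv_slice_last4 {α : Type} (qs : List α) (a b c d e f : α) :
    PySem.List.slice (qs ++ [a, b, c, d, e, f]) (some (-4)) none = [c, d, e, f] := by
  simp only [PySem.List.slice, PySem.List.clampIdx]
  norm_num
  rw [if_neg (by omega)]
  rw [show ((qs.length : Int) + 6 + -4).toNat = qs.length + 2 by omega]
  rw [show qs.length + 6 - (qs.length + 2) = 4 by omega]
  rw [List.drop_append]
  rw [List.drop_eq_nil_of_le (by omega), List.nil_append]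
  rw [show qs.length + 2 - qs.length = 2 by omega]
  rfl

theorem pv_slice_front {α : Type} (qs : List α) (a b c d e f : α) :
    PySem.List.slice (qs ++ [a, b, c, d, e, f]) none (some (-6)) = qs := by
  simp only [PySem.List.slice, PySem.List.clampIdx]
  norm_num

theorem pv_get_m5 {α : Type} (qs : List α) (a b c d e f : α) :
    PySem.List.pyGet? (qs ++ [a, b, c, d, e, f]) (-5) = some b := by
  simp only [PySem.List.pyGet?, PySem.List.pyIdx?]
  rw [if_neg (by norm_num), if_pos (by simp)]
  simp only [Option.bind]
  rw [show (qs ++ [a, b, c, d, e, f]).length - (- (-5) : Int).toNat = qs.length + 1 by simp]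
  rw [List.getElem?_append_right (by omega)]
  simp

theorem pv_get_m6 {α : Type} (qs : List α) (a b c d e f : α) :
    PySem.List.pyGet? (qs ++ [a, b, c, d, e, f]) (-6) = some a := by
  simp only [PySem.List.pyGet?, PySem.List.pyIdx?]
  rw [if_neg (by norm_num), if_pos (by simp)]
  simp only [Option.bind]
  rw [show (qs ++ [a, b, c, d, e, f]).length - (- (-6) : Int).toNat = qs.length by simp]
  rw [List.getElem?_append_right (by omega)]
  simp

theorem pv_scan_spec (s : List Char) :
    s.reverse.foldl pvStep ([], [])
      = (if (pvSplitP s).2.length ≤ 6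
         then ((pvSplitP s).2.reverse, (pvSplitP s).1)
         else ((pvSplitP s).2.reverse.take 6,
               PySem.Chars.join ['_'] ((pvSplitP s).1 :: (pvSplitP s).2.take ((pvSplitP s).2.length - 6)))) := by
  rw [List.foldl_reverse]
  induction s with
  | nil => simp [pvSplitP]
  | cons c t ih =>
    rw [List.foldr_cons, ih]
    rcases hsp : pvSplitP t with ⟨ph, pt⟩
    simp only [pvSplitP, hsp]
    by_cases hc : c = '_'
    · subst hc
      rw [if_pos rfl]
      dsimp only
      by_cases h5 : pt.length < 6
      · rw [if_pos (show pt.length ≤ 6 by omega)]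
        rw [pvStep, if_pos (by refine ⟨rfl, by simpa using h5⟩)]
        rw [if_pos (by simp; omega)]
        simp
      · by_cases h6 : pt.length ≤ 6
        · have he : pt.length = 6 := by omega
          rw [if_pos h6]
          rw [pvStep, if_neg (by simp [he])]
          rw [if_neg (by simp [he])]
          rw [List.reverse_cons, List.take_append_of_le_length (by simp [he])]
          rw [List.take_of_length_le (by simp [he])]
          rw [show (ph :: pt).length - 6 = 1 by simp [he]]
          rw [show List.take 1 (ph :: pt) = [ph] by cases pt <;> simp]
          rw [PySem.Chars.join_cons_cons, PySem.Chars.join_singleton]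
          simp
        · rw [if_neg h6]
          rw [pvStep, if_neg (by simp; omega)]
          rw [if_neg (by simp; omega)]
          rw [List.reverse_cons, List.take_append_of_le_length (by simp; omega)]
          rw [show (ph :: pt).length - 6 = (pt.length - 6) + 1 by simp; omega]
          rw [List.take_succ_cons]
          rw [PySem.Chars.join_cons_cons]
          simp
    · rw [if_neg hc]
      dsimp only
      by_cases h6 : pt.length ≤ 6
      · rw [if_pos h6, if_pos h6]
        rw [pvStep, if_neg (by simp [hc])]
      · rw [if_neg h6, if_neg h6]
        rw [pvStep, if_neg (by simp [hc])]
        have hne : List.take (pt.length - 6) pt ≠ [] := by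
          intro hnil
          have := congrArg List.length hnil
          simp at this
          omega
        obtain ⟨x, xs, hx⟩ := List.exists_cons_of_ne_nil hne
        rw [hx, PySem.Chars.join_cons_cons, PySem.Chars.join_cons_cons]
        simp

theorem pv_scan_ge6 (ph : List Char) (pt : List (List Char)) (h : 6 ≤ pt.length) :
    (if pt.length ≤ 6
     then (pt.reverse, ph)
     else (pt.reverse.take 6, PySem.Chars.join ['_'] (ph :: pt.take (pt.length - 6))))
    = (pt.reverse.take 6, PySem.Chars.join ['_'] (ph :: pt.take (pt.length - 6))) := by
  by_cases h6 : pt.length ≤ 6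
  · have he : pt.length = 6 := by omega
    rw [if_pos h6, List.take_of_length_le (by simp [he])]
    rw [show pt.length - 6 = 0 by omega, List.take_zero, PySem.Chars.join_singleton]
  · rw [if_neg h6]

-- ===== VERDICT (by name: the statement is the Claim_ definition above) =====
theorem parse_ppg_name_py_spec : Claim_equal_parse_ppg_name_py := by
  intro name _hdom
  unfold Spec_parse_ppg_name_py parse_ppg_name_py parse_ppg_name_py_alt
  have hfix := pv_norm_fix name
  obtain ⟨hh, ht⟩ := pv_splitP_chars _ (fun c => PySem.Chars.lowerChar c = c) hfix
  simp only [pv_splitOn_eq, pv_scan_spec]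
  rcases hsp : pvSplitP ((PySem.Str.replace (PySem.Str.lower (PySem.Str.strip name)) " " "").toList) with ⟨ph, pt⟩
  rw [hsp] at hh ht
  dsimp only at hh ht ⊢
  by_cases h5 : pt.length < 5
  · -- fewer than six fields in total: both return none
    rw [if_pos (by simp; omega)]
    rw [if_pos (show pt.length ≤ 6 by omega)]
    dsimp only
    rw [if_pos (Or.inl (by simp; omega))]
  · rw [if_neg (by simp; omega)]
    by_cases he : pt.length = 5
    · -- exactly six fields: B has only five closed fields, A ends with an empty subject
      obtain ⟨rs, a, b, c, d, e, f, heq⟩ := pv_decomp6 (ph :: pt) (by simp [he])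
      have hrs : rs = [] := by
        have hl := congrArg List.length heq
        simp only [List.length_cons, List.length_append, List.length_nil] at hl
        exact List.eq_nil_of_length_eq_zero (by omega)
      subst hrs
      rw [List.nil_append] at heq
      rw [if_pos (show pt.length ≤ 6 by omega)]
      dsimp only
      rw [if_pos (Or.inl (by simp [he]))]
      rw [heq]
      have s4 := pv_slice_last4 ([] : List (List Char)) a b c d e f
      have sf := pv_slice_front ([] : List (List Char)) a b c d e f
      have g5 := pv_get_m5 ([] : List (List Char)) a b c d e f
      have g6 := pv_get_m6 ([] : List (List Char)) a b c d e f
      simp only [List.nil_append] at s4 sf g5 g6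
      rw [s4, sf, g5, g6]
      rw [PySem.Chars.join_nil]
      rw [show PySem.Chars.lower [] = [] from rfl]
      split_ifs <;> first | rfl | simp_all
    · -- at least seven fields: the interesting case
      obtain ⟨rs, a, b, c, d, e, f, heq⟩ := pv_decomp6 pt (by omega)
      subst heq
      rw [pv_scan_ge6 ph (rs ++ [a, b, c, d, e, f]) (by simp only [List.length_append, List.length_cons, List.length_nil]; omega)]
      have hrev : (rs ++ [a, b, c, d, e, f]).reverse.take 6 = [f, e, d, c, b, a] := by
        rw [List.reverse_append]
        rw [List.take_append_of_le_length (by simp)]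
        simp
      have htake : (rs ++ [a, b, c, d, e, f]).take ((rs ++ [a, b, c, d, e, f]).length - 6) = rs := by
        rw [show (rs ++ [a, b, c, d, e, f]).length - 6 = rs.length by simp]
        exact List.take_left
      rw [hrev, htake]
      dsimp only
      rw [show ph :: (rs ++ [a, b, c, d, e, f]) = (ph :: rs) ++ [a, b, c, d, e, f] from rfl]
      rw [pv_slice_last4, pv_slice_front, pv_get_m5, pv_get_m6]
      simp only [Option.getD_some]
      have hb : PySem.Chars.lower b = b := pv_lower_fixed b (fun c0 hc0 => ht b (by simp) c0 hc0)
      have ha : PySem.Chars.lower a = a := pv_lower_fixed a (fun c0 hc0 => ht a (by simp) c0 hc0)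
      have hsubj : PySem.Chars.lower (PySem.Chars.join ['_'] (ph :: rs)) = PySem.Chars.join ['_'] (ph :: rs) := by
        apply pv_lower_join
        intro p hp c0 hc0
        rcases List.mem_cons.mp hp with rfl | hp
        · exact hh c0 hc0
        · exact ht p (by simp [hp]) c0 hc0
      rw [hb, ha, hsubj]
      simp only [List.all_cons, List.all_nil, Bool.and_eq_true, Bool.and_true,
        List.length_cons, List.length_nil]
      split_ifs <;>
        simp_all [PySem.Chars.join_cons_cons, PySem.Chars.join_singleton]
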